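-- pv_equiv track=rewrite | github.com/darindeters/DynamicEC2Scaler | lambda/index.py | parse_day_of_week_field
-- ===== SOURCE A (Python) =====
-- CRON_WEEKDAY_MAP = {
--     "MON": 0,
--     "TUE": 1,
--     "WED": 2,
--     "THU": 3,
--     "FRI": 4,
--     "SAT": 5,
--     "SUN": 6,
-- }
--
-- def cron_value_to_weekday(token):
--     upper_token = token.strip().upper()
--     if not upper_token:
--         raise ValueError("Empty day-of-week token in cron expression")
--     if upper_token in CRON_WEEKDAY_MAP:
--         return CRON_WEEKDAY_MAP[upper_token]
--     try:
--         numeric = int(token)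
--     except ValueError as exc:
--         raise ValueError(f"Unsupported day-of-week token: {token}") from exc
--     if numeric in (0, 7):
--         return 6
--     if 1 <= numeric <= 6:
--         return numeric - 1
--     raise ValueError(f"Day-of-week value out of range: {token}")
--
-- def parse_day_of_week_field(field):
--     normalized = (field or "*").strip().upper()
--     if normalized in {"*", "?"}:
--         return None
--     allowed = set()
--     for segment in normalized.split(","):
--         segment = segment.strip()
--         if not segment:
--             continue
--         if "-" in segment:
--             start_token, end_token = segment.split("-", 1)
--             start = cron_value_to_weekday(start_token)
--             end = cron_value_to_weekday(end_token)
--             if start <= end: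
--                 for value in range(start, end + 1):
--                     allowed.add(value)
--             else:
--                 for value in list(range(start, 7)) + list(range(0, end + 1)):
--                     allowed.add(value)
--         else:
--             allowed.add(cron_value_to_weekday(segment))
--     return allowed
-- ===== SOURCE B (Python) =====
-- CRON_WEEKDAY_MAP = {
--     "MON": 0,
--     "TUE": 1,
--     "WED": 2,
--     "THU": 3,
--     "FRI": 4,
--     "SAT": 5,
--     "SUN": 6,
-- }
--
-- def cron_value_to_weekday(token):
--     upper_token = token.strip().upper()
--     if not upper_token:
--         raise ValueError("Empty day-of-week token in cron expression")
--     if upper_token in CRON_WEEKDAY_MAP: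
--         return CRON_WEEKDAY_MAP[upper_token]
--     try:
--         numeric = int(token)
--     except ValueError as exc:
--         raise ValueError(f"Unsupported day-of-week token: {token}") from exc
--     if numeric in (0, 7):
--         return 6
--     if 1 <= numeric <= 6:
--         return numeric - 1
--     raise ValueError(f"Day-of-week value out of range: {token}")
--
-- def parse_segment(segment):
--     """A non-empty segment as a closed cyclic interval (start, end) of weekdays."""
--     if "-" in segment:
--         start_token, end_token = segment.split("-", 1)
--         return (cron_value_to_weekday(start_token), cron_value_to_weekday(end_token))
--     value = cron_value_to_weekday(segment)
--     return (value, value)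
--
-- def cyclic_run(start, end):
--     """The weekdays walked from start forward to end around the 7-day cycle."""
--     if start == end:
--         return [start]
--     return [start] + cyclic_run((start + 1) % 7, end)
--
-- def parse_day_of_week_field(field):
--     normalized = (field or "*").strip().upper()
--     if normalized in {"*", "?"}:
--         return None
--     intervals = [parse_segment(seg.strip()) for seg in normalized.split(",") if seg.strip()]
--     return {day for start, end in intervals for day in cyclic_run(start, end)}
-- ===== Notes on version B (the rewrite author's own statement) =====
-- stated objective: alternative
-- what changed: B restructures A's single mutating loop into a staged pipeline: it first parses every segment into a closed (start, end) interval, expands each interval with a recursive cyclic walk ((start+1) % 7 until end is hit) instead of A's two directional range branches, and builds the result set once from the flattened days.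
import Mathlib
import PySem

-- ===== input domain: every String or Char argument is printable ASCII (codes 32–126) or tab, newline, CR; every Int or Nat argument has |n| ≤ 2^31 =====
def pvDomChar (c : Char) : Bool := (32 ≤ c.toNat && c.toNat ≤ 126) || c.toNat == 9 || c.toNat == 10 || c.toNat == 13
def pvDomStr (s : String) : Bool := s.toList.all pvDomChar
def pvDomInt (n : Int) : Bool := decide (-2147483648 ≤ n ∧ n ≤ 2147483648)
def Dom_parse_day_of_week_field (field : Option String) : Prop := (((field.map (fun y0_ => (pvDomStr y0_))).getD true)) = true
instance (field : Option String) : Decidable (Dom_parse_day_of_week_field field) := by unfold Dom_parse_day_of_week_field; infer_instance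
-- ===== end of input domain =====

-- B is a staged pipeline — parse every segment into a (start, end) interval first, expand each
-- interval by a recursive cyclic walk, build the set once at the end — instead of A's single
-- loop that mutates the set with two directional range branches (objective: alternative).

-- ===== PORT A =====
-- shared module-level constant CRON_WEEKDAY_MAP (both Pythons define the identical dict)
def cronWeekdayMap : PySem.Dict String Int :=
  PySem.Dict.ofList
    [("MON", 0), ("TUE", 1), ("WED", 2), ("THU", 3), ("FRI", 4), ("SAT", 5), ("SUN", 6)]

-- shared module-level helper cron_value_to_weekday (identical in Source A and Source B);
-- Option: none = the function raises ValueError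
def cron_value_to_weekday (token : String) : Option Int :=
  let upper_token := PySem.Str.upper (PySem.Str.strip token)
  if upper_token = "" then none
  else
    match PySem.Dict.get? cronWeekdayMap upper_token with
    | some v => some v
    | none =>
      match PySem.Int.ofStr? token with
      | none => none
      | some numeric =>
        if numeric = 0 ∨ numeric = 7 then some 6
        else if 1 ≤ numeric ∧ numeric ≤ 6 then some (numeric - 1)
        else none

-- A's two range-expansion loops ('for value in range(...): allowed.add(value)'),
-- applied to the two cron_value_to_weekday results (none = a raise propagates)
def pvExpandRangeA (allowed : PySem.Set Int) (ost oet : Option Int) :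
    Option (PySem.Set Int) :=
  match ost, oet with
  | some start, some «end» =>
    if start ≤ «end» then
      some ((PySem.List.pyRange start («end» + 1) 1).foldl PySem.Set.add allowed)
    else
      some ((PySem.List.pyRange start 7 1 ++ PySem.List.pyRange 0 («end» + 1) 1).foldl
        PySem.Set.add allowed)
  | _, _ => none

-- A's 'allowed.add(cron_value_to_weekday(segment))'
def pvAddSingleA (allowed : PySem.Set Int) (o : Option Int) : Option (PySem.Set Int) :=
  match o with
  | some v => some (PySem.Set.add allowed v)
  | none => none

-- A's loop body; the Option state is none once a ValueError has been raised
def pvStepA (acc : Option (PySem.Set Int)) (segment : String) : Option (PySem.Set Int) :=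
  match acc with
  | none => none
  | some allowed =>
    let segment := PySem.Str.strip segment
    if segment = "" then some allowed
    else if PySem.Str.isIn "-" segment then
      match (PySem.Str.splitMax? segment "-" 1).getD [] with
      | [start_token, end_token] =>
        pvExpandRangeA allowed (cron_value_to_weekday start_token)
          (cron_value_to_weekday end_token)
      | _ => none  -- unreachable: split("-", 1) with "-" present yields exactly two parts
    else pvAddSingleA allowed (cron_value_to_weekday segment)

-- `field or "*"`: None and "" both fall back to "*"
def pvNormalized (field : Option String) : String :=
  PySem.Str.upper (PySem.Str.strip
    (match field with | none => "*" | some s => if s = "" then "*" else s))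

def parse_day_of_week_field (field : Option String) : Option (List Int) :=
  let normalized := pvNormalized field
  if normalized = "*" ∨ normalized = "?" then none
  else
    match ((PySem.Str.split? normalized ",").getD []).foldl pvStepA (some PySem.Set.empty) with
    | some allowed => some allowed
    | none => some []  -- A raises ValueError here; outside Pre_, value unconstrained

-- ===== PORT B =====
-- Source B's parse_segment: a non-empty segment as a closed cyclic interval (start, end);
-- none = a ValueError from cron_value_to_weekday propagates
def parse_segment (segment : String) : Option (Int × Int) :=
  if PySem.Str.isIn "-" segment then
    match (PySem.Str.splitMax? segment "-" 1).getD [] with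
    | [start_token, end_token] =>
      match cron_value_to_weekday start_token, cron_value_to_weekday end_token with
      | some s, some e => some (s, e)
      | _, _ => none
    | _ => none  -- unreachable, as in A
  else (cron_value_to_weekday segment).map (fun v => (v, v))

-- Source B's recursive cyclic_run; Python recurses on (start+1) % 7 until it hits end, which for
-- the weekday values 0..6 cron_value_to_weekday produces takes at most 7 steps — the fuel
-- argument (always called with 7) only makes that same recursion structurally total
def cyclic_run : Nat → Int → Int → List Int
  | 0, _, _ => []
  | fuel + 1, start, «end» =>
    if start = «end» then [start]
    else start :: cyclic_run fuel (PySem.Int.mod (start + 1) 7) «end»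

def parse_day_of_week_field_alt (field : Option String) : Option (List Int) :=
  let normalized := pvNormalized field
  if normalized = "*" ∨ normalized = "?" then none
  else
    -- [parse_segment(seg.strip()) for seg in normalized.split(",") if seg.strip()]
    match ((((PySem.Str.split? normalized ",").getD []).filter
        (fun seg => !(PySem.Str.strip seg == ""))).map PySem.Str.strip).mapM parse_segment with
    | none => some []  -- B raises ValueError here; outside Pre_
    | some intervals =>
      -- {day for start, end in intervals for day in cyclic_run(start, end)}
      some (PySem.Set.ofList (intervals.flatMap (fun p => cyclic_run 7 p.1 p.2)))

-- ===== PRECONDITION & SPEC =====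
-- a token on which cron_value_to_weekday returns (a weekday name, or an int() in 0..7)
def pvValidTok (t : String) : Bool :=
  (["MON", "TUE", "WED", "THU", "FRI", "SAT", "SUN"].contains
    (PySem.Str.upper (PySem.Str.strip t))) ||
  (decide (0 ≤ (PySem.Int.ofStr? t).getD (-1)) && decide ((PySem.Int.ofStr? t).getD (-1) ≤ 7))

-- Pre_ excludes exactly the inputs on which the Python raises ValueError: some non-empty
-- segment is neither a valid single token nor a range whose two halves are valid tokens
def Pre_parse_day_of_week_field (field : Option String) : Prop :=
  pvNormalized field = "*" ∨ pvNormalized field = "?" ∨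
  ∀ seg ∈ (PySem.Str.split? (pvNormalized field) ",").getD [],
    PySem.Str.strip seg = "" ∨
    (if PySem.Str.isIn "-" (PySem.Str.strip seg) then
       pvValidTok (((PySem.Str.splitMax? (PySem.Str.strip seg) "-" 1).getD []).getD 0 "") = true ∧
       pvValidTok (((PySem.Str.splitMax? (PySem.Str.strip seg) "-" 1).getD []).getD 1 "") = true
     else pvValidTok (PySem.Str.strip seg) = true)

instance (field : Option String) : Decidable (Pre_parse_day_of_week_field field) := by
  unfold Pre_parse_day_of_week_field; infer_instance

def pvWitness_parse_day_of_week_field : Option String := some "MON,sat-1, 7 "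

def Spec_parse_day_of_week_field (field : Option String) (out : Option (List Int)) : Prop := out = parse_day_of_week_field_alt field
instance (field : Option String) (out : Option (List Int)) : Decidable (Spec_parse_day_of_week_field field out) := by unfold Spec_parse_day_of_week_field; infer_instance

-- ===== CLAIM (what is proved, stated in full; the proofs are below) =====
def Claim_equal_parse_day_of_week_field : Prop := ∀ (field : Option String), Dom_parse_day_of_week_field field → Pre_parse_day_of_week_field field → Spec_parse_day_of_week_field field (parse_day_of_week_field field)

-- ===== LEMMAS AND PROOFS =====

-- cron_value_to_weekday only ever returns a weekday in 0..6
theorem cron_value_to_weekday_bounds {t : String} {v : Int}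
    (h : cron_value_to_weekday t = some v) : 0 ≤ v ∧ v ≤ 6 := by
  unfold cron_value_to_weekday at h
  dsimp only at h
  split at h
  · exact absurd h (by simp)
  · split at h
    · next u hget =>
      have hmem := PySem.Dict.mem_items_of_get?_eq_some cronWeekdayMap hget
      have hit : cronWeekdayMap.items =
          [("MON", (0:Int)), ("TUE", 1), ("WED", 2), ("THU", 3), ("FRI", 4), ("SAT", 5),
           ("SUN", 6)] := rfl
      rw [hit] at hmem
      obtain rfl : u = v := by simpa using h
      simp only [List.mem_cons, List.not_mem_nil, or_false, Prod.mk.injEq] at hmem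
      rcases hmem with ⟨_, h⟩|⟨_, h⟩|⟨_, h⟩|⟨_, h⟩|⟨_, h⟩|⟨_, h⟩|⟨_, h⟩ <;> omega
    · split at h
      · exact absurd h (by simp)
      · split at h
        · injection h with h
          omega
        · split at h
          · injection h with h
            omega
          · exact absurd h (by simp)

-- A's two-branch range expansion lists exactly the weekdays of B's recursive cyclic walk
theorem expand_eq_cyclic_run (s e : Int) (hs0 : 0 ≤ s) (hs6 : s ≤ 6) (he0 : 0 ≤ e)
    (he6 : e ≤ 6) :
    (if s ≤ e then PySem.List.pyRange s (e + 1) 1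
     else PySem.List.pyRange s 7 1 ++ PySem.List.pyRange 0 (e + 1) 1) =
    cyclic_run 7 s e := by
  interval_cases s <;> interval_cases e <;> decide

-- once a ValueError has been raised, A's loop stays raised
theorem foldl_stepA_none (segs : List String) : segs.foldl pvStepA none = none := by
  induction segs with
  | nil => rfl
  | cons s rest ih => exact ih

-- per non-empty segment: A's inline branching equals updating with B's parsed interval's run
theorem stepA_char (S : PySem.Set Int) (seg : String) (hne : PySem.Str.strip seg ≠ "") :
    pvStepA (some S) seg =
      (parse_segment (PySem.Str.strip seg)).map
        (fun p => PySem.Set.update S (cyclic_run 7 p.1 p.2)) := by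
  unfold pvStepA parse_segment
  dsimp only
  rw [if_neg hne]
  split
  · generalize (PySem.Str.splitMax? (PySem.Str.strip seg) "-" 1).getD [] = parts
    cases parts with
    | nil => rfl
    | cons a tl =>
      cases tl with
      | nil => rfl
      | cons b tl2 =>
        cases tl2 with
        | cons c tl3 => rfl
        | nil =>
          dsimp only
          generalize hst : cron_value_to_weekday a = ost
          generalize het : cron_value_to_weekday b = oet
          cases ost with
          | none => rfl
          | some s =>
            cases oet with
            | none => rfl
            | some e =>
              obtain ⟨hs0, hs6⟩ := cron_value_to_weekday_bounds hst
              obtain ⟨he0, he6⟩ := cron_value_to_weekday_bounds het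
              have hr := expand_eq_cyclic_run s e hs0 hs6 he0 he6
              unfold pvExpandRangeA
              dsimp only [Option.map_some]
              unfold PySem.Set.update
              split
              · next hle => rw [if_pos hle] at hr; rw [hr]
              · next hgt => rw [if_neg hgt] at hr; rw [hr]
  · generalize hc : cron_value_to_weekday (PySem.Str.strip seg) = oc
    cases oc with
    | none => rfl
    | some v =>
      obtain ⟨h0, h6⟩ := cron_value_to_weekday_bounds hc
      have hrun : cyclic_run 7 v v = [v] := by
        unfold cyclic_run; rw [if_pos rfl]
      simp [pvAddSingleA, hrun, PySem.Set.update]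

-- A's whole loop equals B's pipeline: parse the segments, flatten the cyclic runs, update once
theorem foldl_eq_pipeline (segs : List String) (S : PySem.Set Int) :
    segs.foldl pvStepA (some S) =
      (((segs.filter (fun seg => !(PySem.Str.strip seg == ""))).map
          PySem.Str.strip).mapM parse_segment).map
        (fun ivs => PySem.Set.update S (ivs.flatMap (fun p => cyclic_run 7 p.1 p.2))) := by
  induction segs generalizing S with
  | nil => rfl
  | cons seg rest ih =>
    by_cases hne : PySem.Str.strip seg = ""
    · have hstep : pvStepA (some S) seg = some S := by
        unfold pvStepA; dsimp only; rw [if_pos hne]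
      simp only [List.foldl_cons, hstep, List.filter_cons, hne]
      simpa using ih S
    · have hf : (!(PySem.Str.strip seg == "")) = true := by simpa using hne
      simp only [List.foldl_cons, List.filter_cons, hf, if_pos, List.map_cons, List.mapM_cons]
      rw [stepA_char S seg hne]
      cases hp : parse_segment (PySem.Str.strip seg) with
      | none => simp [foldl_stepA_none]
      | some p =>
        simp only [Option.map_some]
        rw [ih]
        cases hm : (((rest.filter (fun seg => !(PySem.Str.strip seg == ""))).map
            PySem.Str.strip).mapM parse_segment) with
        | none => simp
        | some ivs =>
          simp only [Option.map_some]
          simp [PySem.Set.update, List.flatMap_cons, List.foldl_append]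

-- the two ports agree on EVERY input (raises included, via the shared sentinel)
theorem ports_eq (field : Option String) :
    parse_day_of_week_field field = parse_day_of_week_field_alt field := by
  unfold parse_day_of_week_field parse_day_of_week_field_alt
  dsimp only
  split
  · rfl
  · rw [foldl_eq_pipeline]
    cases hm : ((((PySem.Str.split? (pvNormalized field) ",").getD []).filter
        (fun seg => !(PySem.Str.strip seg == ""))).map PySem.Str.strip).mapM parse_segment with
    | none => rfl
    | some ivs =>
      simp only [Option.map_some]
      have : PySem.Set.update PySem.Set.empty
          (ivs.flatMap (fun p => cyclic_run 7 p.1 p.2)) =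
          PySem.Set.ofList (ivs.flatMap (fun p => cyclic_run 7 p.1 p.2)) := by
        rw [PySem.Set.ofList_eq_foldl]; rfl
      rw [this]

-- ===== VERDICT (by name: the statement is the Claim_ definition above) =====
theorem parse_day_of_week_field_spec : Claim_equal_parse_day_of_week_field := by
  intro field _ _
  unfold Spec_parse_day_of_week_field
  exact ports_eq field
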